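-- pv_equiv track=rewrite | github.com/KristaYanb/Theory_of_Information | lab3/LZ77.py | find_in_dict
-- ===== SOURCE A (Python) =====
-- def find_in_dict(buffer, dictionary):
--
--     shift = len(dictionary)
--     substring = ""
--
--     for char in buffer:                         #для каждого симв буфера
--         substring_tmp = substring + char        #временная подстрока (добавл симв буфера к подстроке)
--         shift_tmp = dictionary.rfind(substring_tmp) #номер подстроки в словаре
--
--         if shift_tmp < 0:
--             break
--
--         substring = substring_tmp               #полученная подстрока
--         shift = shift_tmp                       #номер подстроки, найд до этого(до выхода) в словаре
--
--     return len(substring), len(dictionary) - shift      #дл найд эл-та словаря и дл словаря без номера подстроки в нем(смещение)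
-- ===== SOURCE B (Python) =====
-- def _lcp(x, y):
--     m = 0
--     for a, b in zip(x, y):
--         if a != b:
--             break
--         m += 1
--     return m
--
-- def find_in_dict(buffer, dictionary):
--     # single left-to-right scan of the dictionary: at each start position i compute the
--     # length of the common prefix of dictionary[i:] and the buffer; keep the longest
--     # (rightmost on ties) match.
--     best_len, best_pos = 0, len(dictionary)
--     for i in range(len(dictionary)):
--         m = _lcp(dictionary[i:], buffer)
--         if m and m >= best_len:
--             best_len, best_pos = m, i
--     return best_len, len(dictionary) - best_pos
-- ===== Notes on version B (the rewrite author's own statement) =====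
-- stated objective: alternative
-- what changed: Replaces A's greedy prefix-growing loop with a repeated dictionary.rfind per buffer character by a single scan over all dictionary start positions that computes the common-prefix length with the buffer at each position and keeps the longest (rightmost on ties) match.
import Mathlib
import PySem

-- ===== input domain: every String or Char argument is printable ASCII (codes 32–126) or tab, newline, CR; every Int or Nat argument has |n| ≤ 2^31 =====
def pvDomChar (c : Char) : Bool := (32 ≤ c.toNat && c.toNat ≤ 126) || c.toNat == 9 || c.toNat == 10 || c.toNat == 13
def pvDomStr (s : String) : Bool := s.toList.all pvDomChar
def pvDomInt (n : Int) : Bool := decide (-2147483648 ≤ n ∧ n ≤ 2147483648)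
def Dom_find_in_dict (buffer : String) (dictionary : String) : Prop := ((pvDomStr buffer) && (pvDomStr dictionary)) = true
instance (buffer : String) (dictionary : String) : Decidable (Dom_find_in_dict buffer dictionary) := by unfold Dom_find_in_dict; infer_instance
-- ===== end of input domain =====

-- B replaces A's greedy prefix-growing loop (one dictionary.rfind per buffer char) by a single
-- scan over dictionary start positions keeping the longest (rightmost on ties) common prefix
-- with the buffer; objective: alternative algorithm (not claimed faster).

-- ===== PORT A =====
-- hand port of Python str.rfind(sub): greatest start index i in 0..len(d) where sub occurs, else -1
-- (exact: an occurrence of sub at i is 'sub is a prefix of d[i:]'; checking all i in 0..len(d) and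
-- keeping the last match is Python's highest-index rule, including rfind('') = len(d))
def pyRfind (d : List Char) (s : List Char) : Int :=
  (List.range (d.length + 1)).foldl
    (fun acc i => if s.isPrefixOf (d.drop i) then (i : Int) else acc) (-1)

-- the 'for char in buffer' loop of A, with early break when rfind returns -1
def aloop (d : List Char) : List Char → List Char → Int → List Char × Int
  | [], sub, shift => (sub, shift)
  | c :: rest, sub, shift =>
    let subT := sub ++ [c]
    let shiftT := pyRfind d subT
    if shiftT < 0 then (sub, shift) else aloop d rest subT shiftT

def find_in_dict (buffer : String) (dictionary : String) : List Int :=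
  let d := dictionary.toList
  let r := aloop d buffer.toList [] (d.length : Int)
  [(r.1.length : Int), (d.length : Int) - r.2]

-- ===== PORT B =====
-- port of Source B's _lcp: length of the common prefix of two char lists (zip + break)
def lcp : List Char → List Char → Nat
  | a :: x, b :: y => if a = b then lcp x y + 1 else 0
  | _, _ => 0

-- one iteration of B's 'for i in range(len(dictionary))' loop
def bstep (d : List Char) (b : List Char) (st : Nat × Nat) (i : Nat) : Nat × Nat :=
  let m := lcp (d.drop i) b
  if m ≠ 0 ∧ st.1 ≤ m then (m, i) else st

def find_in_dict_alt (buffer : String) (dictionary : String) : List Int :=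
  let d := dictionary.toList
  let b := buffer.toList
  let r := (List.range d.length).foldl (bstep d b) (0, d.length)
  [(r.1 : Int), (d.length : Int) - (r.2 : Int)]

-- ===== PRECONDITION & SPEC =====
def Spec_find_in_dict (buffer : String) (dictionary : String) (out : List Int) : Prop := out = find_in_dict_alt buffer dictionary
instance (buffer : String) (dictionary : String) (out : List Int) : Decidable (Spec_find_in_dict buffer dictionary out) := by unfold Spec_find_in_dict; infer_instance

-- ===== CLAIM (what is proved, stated in full; the proofs are below) =====
def Claim_equal_find_in_dict : Prop := ∀ (buffer : String) (dictionary : String), Dom_find_in_dict buffer dictionary → Spec_find_in_dict buffer dictionary (find_in_dict buffer dictionary)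

-- ===== LEMMAS AND PROOFS =====

-- last index i < n with p i (proof-side tool for 'rightmost match' folds)
def lastSat (n : Nat) (p : Nat → Bool) : Option Nat :=
  (List.range n).foldl (fun acc i => if p i then some i else acc) none

theorem lastSat_succ (n : Nat) (p : Nat → Bool) :
    lastSat (n + 1) p = if p n then some n else lastSat n p := by
  simp [lastSat, List.range_succ]

theorem foldl_if_lastSat {α : Type} (g : Nat → α) (a0 : α) (p : Nat → Bool) :
    ∀ n, (List.range n).foldl (fun acc i => if p i then g i else acc) a0
      = (lastSat n p).elim a0 g := by
  intro n
  induction n with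
  | zero => simp [lastSat]
  | succ n ih =>
    rw [List.range_succ, List.foldl_append, ih, lastSat_succ]
    cases hp : p n <;> cases h : lastSat n p <;> simp [hp]

theorem lastSat_eq_none_iff (n : Nat) (p : Nat → Bool) :
    lastSat n p = none ↔ ∀ i < n, ¬ p i = true := by
  induction n with
  | zero => simp [lastSat]
  | succ n ih =>
    rw [lastSat_succ]
    by_cases hp : p n = true
    · rw [if_pos hp]
      constructor
      · intro h; exact absurd h (by simp)
      · intro h; exact absurd hp (h n (Nat.lt_succ_self n))
    · rw [if_neg hp, ih]
      constructor
      · intro h i hi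
        rcases Nat.lt_succ_iff_lt_or_eq.mp hi with h' | h'
        · exact h i h'
        · subst h'; exact hp
      · intro h i hi; exact h i (Nat.lt_succ_of_lt hi)

-- ---- lcp facts ----
theorem lcp_nil (y : List Char) : lcp [] y = 0 := by cases y <;> rfl

theorem lcp_le_right : ∀ (x y : List Char), lcp x y ≤ y.length := by
  intro x
  induction x with
  | nil => intro y; simp [lcp_nil]
  | cons a x ih =>
    intro y
    cases y with
    | nil => simp [lcp]
    | cons c yt =>
      simp only [lcp, List.length_cons]
      split
      · exact Nat.succ_le_succ (ih yt)
      · exact Nat.zero_le _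

theorem prefix_lcp : ∀ (k : Nat) (b x : List Char), k ≤ b.length →
    ((b.take k).isPrefixOf x = true ↔ k ≤ lcp x b) := by
  intro k
  induction k with
  | zero => intro b x _; simp
  | succ k ih =>
    intro b x hk
    cases b with
    | nil => simp at hk
    | cons c bt =>
      cases x with
      | nil => simp [List.take_succ_cons, lcp_nil]
      | cons a xt =>
        simp only [List.take_succ_cons, List.isPrefixOf, lcp]
        by_cases hac : a = c
        · subst hac
          rw [if_pos rfl]
          simp only [BEq.rfl, Bool.true_and]
          rw [ih bt xt (by simpa using hk)]
          omega
        · have hba : (c == a) = false := by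
            simp [beq_eq_false_iff_ne]; exact fun h => hac h.symm
          rw [if_neg hac, hba]
          simp

-- ---- maximal common-prefix length over start positions < n ----
def maxm (d b : List Char) : Nat → Nat
  | 0 => 0
  | n + 1 => max (maxm d b n) (lcp (d.drop n) b)

theorem lcp_le_maxm (d b : List Char) : ∀ n i, i < n → lcp (d.drop i) b ≤ maxm d b n := by
  intro n
  induction n with
  | zero => intro i h; exact absurd h (Nat.not_lt_zero i)
  | succ n ih =>
    intro i hi
    rcases Nat.lt_succ_iff_lt_or_eq.mp hi with h | h
    · exact le_trans (ih i h) (le_max_left _ _)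
    · subst h; exact le_max_right _ _

theorem maxm_cases (d b : List Char) : ∀ n, maxm d b n = 0 ∨ ∃ i < n, maxm d b n = lcp (d.drop i) b := by
  intro n
  induction n with
  | zero => left; rfl
  | succ n ih =>
    simp only [maxm]
    by_cases h : maxm d b n ≤ lcp (d.drop n) b
    · right; exact ⟨n, Nat.lt_succ_self n, by rw [Nat.max_eq_right h]⟩
    · rw [Nat.max_eq_left (Nat.le_of_not_le h)]
      rcases ih with h0 | ⟨i, hi, he⟩
      · left; exact h0
      · right; exact ⟨i, Nat.lt_succ_of_lt hi, he⟩

-- ---- characterisation of B's fold ----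
theorem bfold_spec (d b : List Char) : ∀ n,
    (List.range n).foldl (bstep d b) (0, d.length)
      = (maxm d b n,
         if maxm d b n = 0 then d.length
         else (lastSat n (fun i => decide (maxm d b n ≤ lcp (d.drop i) b))).getD d.length) := by
  intro n
  induction n with
  | zero => simp [maxm]
  | succ n ih =>
    rw [List.range_succ, List.foldl_append, ih, List.foldl_cons, List.foldl_nil]
    simp only [maxm, bstep]
    by_cases hcond : lcp (d.drop n) b ≠ 0 ∧ maxm d b n ≤ lcp (d.drop n) b
    · rw [if_pos hcond]
      simp only [Nat.max_eq_right hcond.2, if_neg hcond.1, lastSat_succ]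
      rw [if_pos (by simp)]
      rfl
    · rw [if_neg hcond]
      by_cases hM : maxm d b n = 0
      · have hm0 : lcp (d.drop n) b = 0 := by
          by_contra hm
          exact hcond ⟨hm, hM ▸ Nat.zero_le _⟩
        simp only [hM, hm0]
        simp
      · have hlt : lcp (d.drop n) b < maxm d b n := by
          rcases Decidable.not_and_iff_not_or_not.mp hcond with h | h
          · omega
          · omega
        simp only [Nat.max_eq_left (Nat.le_of_lt hlt), if_neg hM, lastSat_succ]
        rw [if_neg (by simp; omega)]

-- ---- the length A's greedy loop reaches ----
abbrev Kocc (d b : List Char) (k : Nat) : Prop := ∃ i < d.length + 1, k ≤ lcp (List.drop i d) b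

abbrev Kval (d b : List Char) : Nat := Nat.findGreatest (Kocc d b) b.length

theorem Kocc_zero (d b : List Char) : Kocc d b 0 :=
  ⟨0, Nat.succ_pos _, Nat.zero_le _⟩

theorem Kocc_Kval (d b : List Char) : Kocc d b (Kval d b) := by
  rcases Nat.eq_zero_or_pos (Kval d b) with h | h
  · rw [h]; exact Kocc_zero d b
  · exact Nat.findGreatest_spec (Nat.zero_le _) (Kocc_zero d b)

theorem Kval_le (d b : List Char) : Kval d b ≤ b.length := Nat.findGreatest_le _

-- ---- pyRfind characterisation ----
theorem pyRfind_eq (d s : List Char) :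
    pyRfind d s = (lastSat (d.length + 1) (fun i => s.isPrefixOf (d.drop i))).elim (-1) (fun i => (i : Int)) :=
  foldl_if_lastSat _ _ _ _

theorem pyRfind_neg_iff (d s : List Char) :
    pyRfind d s < 0 ↔ ∀ i < d.length + 1, ¬ s.isPrefixOf (d.drop i) = true := by
  rw [pyRfind_eq, ← lastSat_eq_none_iff]
  cases h : lastSat (d.length + 1) (fun i => s.isPrefixOf (d.drop i)) with
  | none => simp
  | some j => simp

-- ---- characterisation of A's loop ----
theorem aloop_spec (d b : List Char) :
    ∀ n t (shift : Int), t ≤ Kval d b → b.length ≤ t + n →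
      aloop d (b.drop t) (b.take t) shift
        = (b.take (Kval d b),
           if t = Kval d b then shift else pyRfind d (b.take (Kval d b))) := by
  intro n
  induction n with
  | zero =>
    intro t shift ht hn
    have htK : t = Kval d b := le_antisymm ht (le_trans (Kval_le d b) (by omega))
    rw [List.drop_eq_nil_of_le (by omega)]
    simp [aloop, htK]
  | succ n ih =>
    intro t shift ht hn
    by_cases hlen : b.length ≤ t
    · have htK : t = Kval d b := le_antisymm ht (le_trans (Kval_le d b) hlen)
      rw [List.drop_eq_nil_of_le hlen]
      simp [aloop, htK]
    · have ht' : t < b.length := Nat.lt_of_not_le hlen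
      rw [List.drop_eq_getElem_cons ht']
      simp only [aloop]
      have hsub : b.take t ++ [b[t]] = b.take (t + 1) := by
        rw [List.take_add_one, List.getElem?_eq_getElem ht']
        rfl
      rw [hsub]
      by_cases htK : t = Kval d b
      · subst htK
        have hng : ¬ Kocc d b (Kval d b + 1) :=
          Nat.findGreatest_is_greatest (Nat.lt_succ_self _) ht'
        have hneg : pyRfind d (b.take (Kval d b + 1)) < 0 := by
          rw [pyRfind_neg_iff]
          intro i hi hpre
          exact hng ⟨i, hi, (prefix_lcp _ b _ ht').mp hpre⟩
        rw [if_pos hneg]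
        simp
      · have htlt : t < Kval d b := Nat.lt_of_le_of_ne ht htK
        obtain ⟨i, hi, hKi⟩ := Kocc_Kval d b
        have hpre : (b.take (t + 1)).isPrefixOf (List.drop i d) = true :=
          (prefix_lcp (t + 1) b _ (le_trans htlt (Kval_le d b))).mpr (le_trans htlt hKi)
        have hpos : ¬ pyRfind d (b.take (t + 1)) < 0 := by
          intro hneg
          exact (pyRfind_neg_iff d _).mp hneg i hi hpre
        rw [if_neg hpos]
        rw [ih (t + 1) (pyRfind d (b.take (t + 1))) htlt (by omega)]
        rw [if_neg htK]
        by_cases h1 : t + 1 = Kval d b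
        · rw [if_pos h1, h1]
        · rw [if_neg h1]

theorem Kval_eq_maxm (d b : List Char) : Kval d b = maxm d b d.length := by
  apply le_antisymm
  · obtain ⟨i, hi, hKi⟩ := Kocc_Kval d b
    rcases Nat.lt_succ_iff_lt_or_eq.mp hi with h | h
    · exact le_trans hKi (lcp_le_maxm d b d.length i h)
    · subst h
      rw [List.drop_length, lcp_nil] at hKi
      omega
  · rcases maxm_cases d b d.length with h0 | ⟨i, hi, he⟩
    · omega
    · exact Nat.le_findGreatest (he ▸ lcp_le_right _ _) ⟨i, Nat.lt_succ_of_lt hi, le_of_eq he⟩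

-- ===== VERDICT (by name: the statement is the Claim_ definition above) =====
theorem find_in_dict_spec : Claim_equal_find_in_dict := by
  intro buffer dictionary _
  unfold Spec_find_in_dict
  simp only [find_in_dict, find_in_dict_alt]
  set d := dictionary.toList with hd
  set b := buffer.toList with hb
  have hA := aloop_spec d b b.length 0 (d.length : Int) (Nat.zero_le _) (by omega)
  rw [List.drop_zero, List.take_zero] at hA
  rw [hA, bfold_spec d b d.length, ← Kval_eq_maxm d b]
  set K := Kval d b with hK
  have hKb : K ≤ b.length := Kval_le d b
  by_cases hK0 : K = 0
  · simp [hK0]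
  · rw [if_neg (by omega : ¬ (0 = K)), if_neg hK0, pyRfind_eq]
    have hpred : (fun i => (b.take K).isPrefixOf (List.drop i d))
        = (fun i => decide (K ≤ lcp (List.drop i d) b)) := by
      funext i
      have h := prefix_lcp K b (List.drop i d) hKb
      rw [Bool.eq_iff_iff]
      simpa using h
    rw [hpred, lastSat_succ]
    have hD : (decide (K ≤ lcp (List.drop d.length d) b)) = false := by
      rw [List.drop_length, lcp_nil]
      simp
      omega
    rw [hD, if_neg (by simp)]
    obtain ⟨i, hi, hKi⟩ := Kocc_Kval d b
    have hi' : i < d.length := by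
      rcases Nat.lt_succ_iff_lt_or_eq.mp hi with h | h
      · exact h
      · subst h; rw [List.drop_length, lcp_nil] at hKi; omega
    cases hj : lastSat d.length (fun i => decide (K ≤ lcp (List.drop i d) b)) with
    | none =>
      have := (lastSat_eq_none_iff _ _).mp hj i hi'
      simp only [decide_eq_true_iff] at this
      exact absurd hKi this
    | some j =>
      simp [List.length_take, Nat.min_eq_left hKb]
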